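-- pv_equiv track=rewrite | github.com/QuentinRoy/Word-Suggestions-Accuracy | scripts/loggings/export_events.py | get_target_word_idx
-- ===== SOURCE A (Python) =====
-- def get_correct_input(input, sentence):
--     result = ""
--     for i in range(0, min(len(input), len(sentence))):
--         if input[i] == sentence[i]:
--             result += input[i]
--         else:
--             break
--     return result
--
-- def get_target_word_idx(event, previous_event, sentence, sentence_words):
--     if previous_event is None:
--         return 0
--     correct_input_before = (
--         previous_event["input"]
--         if previous_event["isError"]
--         else get_correct_input(previous_event["input"], sentence)
--     )
--     input_length = len(correct_input_before)
--     sentence_size = 0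
--     for word_idx, word in enumerate(sentence_words):
--         sentence_size += len(word) + 1  # +1 for space.
--         if sentence_size > input_length:
--             return word_idx
--     return None
-- ===== SOURCE B (Python) =====
-- from itertools import takewhile, accumulate
-- from bisect import bisect_right
--
--
-- def get_target_word_idx(event, previous_event, sentence, sentence_words):
--     if previous_event is None:
--         return 0
--     if previous_event["isError"]:
--         correct_input_before = previous_event["input"]
--     else:
--         correct_input_before = "".join(
--             a
--             for a, _ in takewhile(
--                 lambda p: p[0] == p[1], zip(previous_event["input"], sentence)
--             )
--         )
--     input_length = len(correct_input_before)
--     cum = list(accumulate(len(w) + 1 for w in sentence_words))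
--     idx = bisect_right(cum, input_length)
--     return None if idx == len(sentence_words) else idx
-- ===== Notes on version B (the rewrite author's own statement) =====
-- stated objective: idiomatic
-- what changed: Replaces the char-by-char comparison loop with takewhile over zip, and the running-sum word loop with an accumulate cumulative-length list searched by bisect_right.
import Mathlib
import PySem

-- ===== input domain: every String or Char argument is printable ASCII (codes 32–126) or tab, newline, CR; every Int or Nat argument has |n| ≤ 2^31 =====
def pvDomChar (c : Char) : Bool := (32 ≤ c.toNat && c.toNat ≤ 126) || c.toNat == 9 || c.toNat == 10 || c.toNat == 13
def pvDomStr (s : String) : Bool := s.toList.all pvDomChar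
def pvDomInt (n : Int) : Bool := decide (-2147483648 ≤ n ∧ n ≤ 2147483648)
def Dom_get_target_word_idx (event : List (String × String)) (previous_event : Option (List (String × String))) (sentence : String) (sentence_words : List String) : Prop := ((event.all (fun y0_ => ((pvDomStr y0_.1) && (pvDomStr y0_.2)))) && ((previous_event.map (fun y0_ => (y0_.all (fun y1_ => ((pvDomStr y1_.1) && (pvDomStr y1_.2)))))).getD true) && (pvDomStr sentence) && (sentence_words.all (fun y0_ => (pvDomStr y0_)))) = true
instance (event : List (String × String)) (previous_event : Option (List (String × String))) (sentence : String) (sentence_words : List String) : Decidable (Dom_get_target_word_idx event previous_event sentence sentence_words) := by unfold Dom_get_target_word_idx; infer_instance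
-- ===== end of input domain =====

-- Header: B replaces A's char-loop with takewhile-over-zip and A's running-sum word loop
-- with an accumulate cumulative-length list searched by bisect_right (idiomatic, same cost).

-- ===== PORT A =====
def get_correct_input_go : List Char → List Char → List Char
  | a :: as, b :: bs => if a = b then a :: get_correct_input_go as bs else []
  | _, _ => []

def get_correct_input (input : String) (sentence : String) : String :=
  String.ofList (get_correct_input_go input.toList sentence.toList)

def gtwLoopA : List String → Int → Int → Int → Option Int
  | [], _, _, _ => none
  | w :: ws, word_idx, sentence_size, input_length =>
      let s := sentence_size + PySem.Str.len w + 1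
      if s > input_length then some word_idx
      else gtwLoopA ws (word_idx + 1) s input_length

def get_target_word_idx (event : List (String × String)) (previous_event : Option (List (String × String))) (sentence : String) (sentence_words : List String) : Option Int :=
  match previous_event with
  | none => some 0
  | some pe =>
    match (PySem.Dict.mk pe).get? "isError", (PySem.Dict.mk pe).get? "input" with
    | some isErr, some inp =>
        let correct_input_before := if isErr ≠ "" then inp else get_correct_input inp sentence
        let input_length := PySem.Str.len correct_input_before
        gtwLoopA sentence_words 0 0 input_length
    | _, _ => none  -- KeyError in Python; excluded by Pre_

-- ===== PORT B =====
-- itertools.accumulate of a list of ints (running sums)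
def accumulateB : Int → List Int → List Int
  | _, [] => []
  | acc, x :: xs => (acc + x) :: accumulateB (acc + x) xs

def get_target_word_idx_alt (event : List (String × String)) (previous_event : Option (List (String × String))) (sentence : String) (sentence_words : List String) : Option Int :=
  previous_event.elim (some 0) (fun pe =>
    ((PySem.Dict.mk pe).get? "isError").elim none (fun isErr =>    -- none: KeyError in Python, excluded by Pre_
    ((PySem.Dict.mk pe).get? "input").elim none (fun inp =>
        let correct : List Char :=
          if isErr ≠ "" then inp.toList
          else ((inp.toList.zip sentence.toList).takeWhile (fun p => p.1 == p.2)).map Prod.fst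
        let input_length : Int := (correct.length : Int)
        let cum := accumulateB 0 (sentence_words.map (fun w => PySem.Str.len w + 1))
        let idx := PySem.List.bisectRight cum input_length
        if idx = sentence_words.length then none else some (idx : Int))))

-- ===== PRECONDITION & SPEC =====
-- Pre_ excludes only dicts missing the "isError" or "input" key, where Python A raises KeyError.
def Pre_get_target_word_idx (event : List (String × String)) (previous_event : Option (List (String × String))) (sentence : String) (sentence_words : List String) : Prop :=
  (previous_event.map (fun pe =>
    ((PySem.Dict.mk pe).get? "isError").isSome && ((PySem.Dict.mk pe).get? "input").isSome)).getD true = true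
instance (event : List (String × String)) (previous_event : Option (List (String × String))) (sentence : String) (sentence_words : List String) : Decidable (Pre_get_target_word_idx event previous_event sentence sentence_words) := by unfold Pre_get_target_word_idx; infer_instance
def pvWitness_get_target_word_idx : (List (String × String)) × (Option (List (String × String))) × String × List String :=
  ([], some [("isError", ""), ("input", "ab")], "ab cd", ["ab", "cd"])

def Spec_get_target_word_idx (event : List (String × String)) (previous_event : Option (List (String × String))) (sentence : String) (sentence_words : List String) (out : Option Int) : Prop := out = get_target_word_idx_alt event previous_event sentence sentence_words
instance (event : List (String × String)) (previous_event : Option (List (String × String))) (sentence : String) (sentence_words : List String) (out : Option Int) : Decidable (Spec_get_target_word_idx event previous_event sentence sentence_words out) := by unfold Spec_get_target_word_idx; infer_instance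

-- ===== CLAIM (what is proved, stated in full; the proofs are below) =====
def Claim_equal_get_target_word_idx : Prop := ∀ (event : List (String × String)) (previous_event : Option (List (String × String))) (sentence : String) (sentence_words : List String), Dom_get_target_word_idx event previous_event sentence sentence_words → Pre_get_target_word_idx event previous_event sentence sentence_words → Spec_get_target_word_idx event previous_event sentence sentence_words (get_target_word_idx event previous_event sentence sentence_words)

-- ===== LEMMAS AND PROOFS =====

theorem tw_len_le {α : Type} (p : α → Bool) (xs : List α) :
    (xs.takeWhile p).length ≤ xs.length := by
  induction xs with
  | nil => simp
  | cons x xs ih =>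
    by_cases hp : p x = true
    · simp only [List.takeWhile_cons, hp, if_true, List.length_cons]; omega
    · simp [hp]

-- the elements taken by takeWhile satisfy p, element-wise
theorem tw_getElem {α : Type} (p : α → Bool) (xs : List α) (j : Nat)
    (hj : j < (xs.takeWhile p).length) (hx : j < xs.length) : p (xs[j]) = true := by
  induction xs generalizing j with
  | nil => simp at hx
  | cons x xs ih =>
    by_cases hp : p x = true
    · cases j with
      | zero => simpa using hp
      | succ j =>
        simp only [List.takeWhile_cons, hp, if_true, List.length_cons, Nat.add_lt_add_iff_right] at hj
        simpa using ih j hj (by simpa using hx)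
    · simp only [List.takeWhile_cons, if_neg hp] at hj
      simp at hj

-- the first element not taken falsifies p
theorem tw_stop {α : Type} (p : α → Bool) (xs : List α)
    (h : (xs.takeWhile p).length < xs.length) :
    p (xs[(xs.takeWhile p).length]'h) = false := by
  induction xs with
  | nil => simp at h
  | cons x xs ih =>
    by_cases hp : p x = true
    · simp only [List.takeWhile_cons, hp, if_true, List.length_cons] at h ⊢
      exact ih (by omega)
    · simp only [List.takeWhile_cons, if_neg hp]
      simpa using hp

theorem accumulateB_le (a : Int) (xs : List Int) (h : ∀ x ∈ xs, 0 ≤ x) :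
    ∀ y ∈ accumulateB a xs, a ≤ y := by
  induction xs generalizing a with
  | nil => simp [accumulateB]
  | cons x xs ih =>
    intro y hy
    have hx : 0 ≤ x := h x (by simp)
    simp only [accumulateB, List.mem_cons] at hy
    rcases hy with rfl | hy
    · omega
    · have := ih (a + x) (fun z hz => h z (by simp [hz])) y hy; omega

theorem accumulateB_sorted (a : Int) (xs : List Int) (h : ∀ x ∈ xs, 0 ≤ x) :
    List.Pairwise (fun x1 x2 => x1 ≤ x2) (accumulateB a xs) := by
  induction xs generalizing a with
  | nil => simp [accumulateB]
  | cons x xs ih =>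
    simp only [accumulateB, List.pairwise_cons]
    exact ⟨accumulateB_le (a + x) xs (fun z hz => h z (by simp [hz])),
           ih (a + x) (fun z hz => h z (by simp [hz]))⟩

-- on a sorted list, bisect_right = length of the ≤-prefix
theorem bisectRight_eq_takeWhile (xs : List Int) (x : Int)
    (hs : List.Pairwise (fun x1 x2 => x1 ≤ x2) xs) :
    PySem.List.bisectRight xs x = (xs.takeWhile (fun c => decide (c ≤ x))).length := by
  obtain ⟨hle, hlt, hgt⟩ := PySem.List.bisectRight_spec xs x hs
  have htle : (xs.takeWhile (fun c => decide (c ≤ x))).length ≤ xs.length :=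
    tw_len_le _ _
  rcases Nat.lt_trichotomy (PySem.List.bisectRight xs x)
      (xs.takeWhile (fun c => decide (c ≤ x))).length with hbt | hbt | hbt
  · have hblen : PySem.List.bisectRight xs x < xs.length := lt_of_lt_of_le hbt htle
    have h1 := tw_getElem (fun c => decide (c ≤ x)) xs _ hbt hblen
    have h2 := hgt _ hblen (le_refl _)
    simp only [decide_eq_true_eq] at h1
    omega
  · exact hbt
  · have htlen : (xs.takeWhile (fun c => decide (c ≤ x))).length < xs.length :=
      lt_of_lt_of_le hbt hle
    have h1 := tw_stop (fun c => decide (c ≤ x)) xs htlen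
    have h2 := hlt _ htlen hbt
    simp only [decide_eq_false_iff_not, not_le] at h1
    omega

-- A's word loop equals the prefix-length of the accumulated sums
theorem gtwLoopA_eq (ws : List String) (idx0 sz L : Int) :
    gtwLoopA ws idx0 sz L =
      (if ((accumulateB sz (ws.map (fun w => PySem.Str.len w + 1))).takeWhile
            (fun c => decide (c ≤ L))).length = ws.length then none
       else some (idx0 + ((((accumulateB sz (ws.map (fun w => PySem.Str.len w + 1))).takeWhile
            (fun c => decide (c ≤ L))).length : Nat) : Int))) := by
  induction ws generalizing idx0 sz with
  | nil => simp [gtwLoopA, accumulateB]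
  | cons w ws ih =>
    have hassoc : sz + (PySem.Str.len w + 1) = sz + PySem.Str.len w + 1 := by ring
    show (if sz + PySem.Str.len w + 1 > L then some idx0
          else gtwLoopA ws (idx0 + 1) (sz + PySem.Str.len w + 1) L) = _
    by_cases hgt : sz + PySem.Str.len w + 1 > L
    · have hb : (decide (sz + PySem.Str.len w + 1 ≤ L)) = false := by
        simp only [decide_eq_false_iff_not, not_le]; omega
      simp only [List.map_cons, accumulateB, List.takeWhile_cons, hassoc, hb,
        Bool.false_eq_true, if_false, List.length_nil, List.length_cons]
      rw [if_pos hgt, if_neg (by omega)]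
      simp
    · have hb : (decide (sz + PySem.Str.len w + 1 ≤ L)) = true := by
        simp only [decide_eq_true_eq]; omega
      simp only [List.map_cons, accumulateB, List.takeWhile_cons, hassoc, hb,
        if_true, List.length_cons]
      rw [if_neg hgt, ih]
      have hk := tw_len_le (fun c => decide (c ≤ L))
        (accumulateB (sz + PySem.Str.len w + 1) (ws.map (fun w => PySem.Str.len w + 1)))
      split_ifs with h1 h2 h2
      · rfl
      · omega
      · omega
      · congr 1
        push_cast
        ring

-- A's char loop computes the same characters as takeWhile over zip
theorem go_eq_takeWhile (as bs : List Char) :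
    get_correct_input_go as bs =
      ((as.zip bs).takeWhile (fun p => p.1 == p.2)).map Prod.fst := by
  induction as generalizing bs with
  | nil => simp [get_correct_input_go]
  | cons a as ih =>
    cases bs with
    | nil => simp [get_correct_input_go]
    | cons b bs =>
      simp only [get_correct_input_go, List.zip_cons_cons, List.takeWhile_cons]
      by_cases h : a = b
      · simp [h, ih]
      · simp [h]

-- ===== VERDICT (by name: the statement is the Claim_ definition above) =====
theorem get_target_word_idx_spec : Claim_equal_get_target_word_idx := by
  intro event previous_event sentence sentence_words _ hpre
  unfold Spec_get_target_word_idx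
  cases previous_event with
  | none => rfl
  | some pe =>
    simp only [Pre_get_target_word_idx, Option.map_some, Option.getD_some,
      Bool.and_eq_true] at hpre
    obtain ⟨h1, h2⟩ := hpre
    obtain ⟨isErr, he⟩ := Option.isSome_iff_exists.mp h1
    obtain ⟨inp, hi⟩ := Option.isSome_iff_exists.mp h2
    simp only [get_target_word_idx, get_target_word_idx_alt, Option.elim_some, he, hi]
    have hlen : PySem.Str.len (if isErr ≠ "" then inp else get_correct_input inp sentence)
        = (((if isErr ≠ "" then inp.toList
            else ((inp.toList.zip sentence.toList).takeWhile (fun p => p.1 == p.2)).map Prod.fst)).length : Int) := by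
      split_ifs with h
      · simp [PySem.Str.len_eq]
      · simp [PySem.Str.len_eq, get_correct_input, go_eq_takeWhile]
    rw [hlen, gtwLoopA_eq,
        bisectRight_eq_takeWhile _ _ (accumulateB_sorted 0 _ (by
          intro x hx
          simp only [List.mem_map] at hx
          obtain ⟨w, _, rfl⟩ := hx
          have : (0:Int) ≤ PySem.Str.len w := by simp [PySem.Str.len_eq]
          omega))]
    simp
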